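-- pv_equiv track=rewrite | github.com/shrr98/sketching | random_stroke_generator2.py | move_sequence
-- ===== SOURCE A (Python) =====
-- def move_sequence(current, target):
--     '''
--     Generate sequence of movements from current to target
--     on pen up.
--     '''
--     moves = []
--     pen_step = 5
--
--     x_jump = target[0] - current[0]
--     y_jump = target[1] - current[1]
--
--     if x_jump==0 and y_jump==0: # if not jumping
--         return []
--
--     x_direction = 1 if x_jump >=0 else -1
--     y_direction = 1 if y_jump >= 0 else -1
--
--     x_steps = [x_direction*pen_step for _ in range(x_direction*pen_step, x_jump+x_direction, x_direction*pen_step)]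
--     if x_jump % pen_step :
--         if x_direction==1:
--             x_steps.append(x_jump%pen_step)
--         else:
--             x_steps.append(x_jump%pen_step - pen_step)
--
--     y_steps = [y_direction*pen_step for _ in range(y_direction*pen_step, y_jump+y_direction, y_direction*pen_step)]
--     if y_jump % pen_step :
--         if y_direction==1:
--             y_steps.append(y_jump%pen_step)
--         else:
--             y_steps.append(y_jump%pen_step - pen_step)
--
--
--     # pushing the moves
--     if len(x_steps) >= len(y_steps):
--         moves = [(x,y) for x, y in zip(x_steps[:len(y_steps)], y_steps)]
--         for x in x_steps[len(y_steps):] :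
--             moves.append((x,0))
--     elif len(x_steps) < len(y_steps):
--         moves = [(x,y) for x, y in zip(x_steps, y_steps[:len(y_steps)])]
--         for y in y_steps[len(x_steps):]:
--             moves.append((0,y))
--
--     return moves
-- ===== SOURCE B (Python) =====
-- def move_sequence(current, target):
--     '''
--     Generate sequence of movements from current to target
--     on pen up.
--     '''
--     x_jump = target[0] - current[0]
--     y_jump = target[1] - current[1]
--     if x_jump == 0 and y_jump == 0:
--         return []
--
--     def split(jump):
--         step = 5 if jump >= 0 else -5
--         full = abs(jump) // 5
--         rem = jump - step * full          # signed partial step, 0 iff jump % 5 == 0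
--         total = full + (1 if rem else 0)
--         return step, full, rem, total
--
--     sx, fx, rx, nx = split(x_jump)
--     sy, fy, ry, ny = split(y_jump)
--
--     moves = []
--     for i in range(max(nx, ny)):
--         dx = sx if i < fx else (rx if i < nx else 0)
--         dy = sy if i < fy else (ry if i < ny else 0)
--         moves.append((dx, dy))
--     return moves
-- ===== Notes on version B (the rewrite author's own statement) =====
-- stated objective: alternative
-- what changed: B computes per-axis step counts and the signed partial step arithmetically (abs(jump)//5 and jump - step*full) and emits the moves in a single index-driven loop over range(max(nx, ny)), replacing A's two materialized per-axis step lists and the zip/slice/append two-branch merge.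
import Mathlib
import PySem

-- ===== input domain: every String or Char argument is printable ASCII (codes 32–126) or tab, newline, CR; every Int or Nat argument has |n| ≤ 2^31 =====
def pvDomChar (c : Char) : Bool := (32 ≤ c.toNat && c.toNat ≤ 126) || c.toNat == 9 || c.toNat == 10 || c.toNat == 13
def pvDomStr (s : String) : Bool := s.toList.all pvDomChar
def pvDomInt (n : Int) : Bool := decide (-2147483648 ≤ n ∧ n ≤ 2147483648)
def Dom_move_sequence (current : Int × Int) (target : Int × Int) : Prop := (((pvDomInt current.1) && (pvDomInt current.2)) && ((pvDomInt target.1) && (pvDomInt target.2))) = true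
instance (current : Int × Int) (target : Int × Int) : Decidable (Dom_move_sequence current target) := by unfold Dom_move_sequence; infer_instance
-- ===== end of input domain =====

-- B replaces A's two per-axis step lists plus the zip/slice/append merge by per-axis
-- step counts and a single index-driven pass over range(max(nx, ny)) (objective: alternative).

-- ===== PORT A =====
def move_sequence (current : Int × Int) (target : Int × Int) : List (Int × Int) :=
  let pen_step : Int := 5
  let x_jump := target.1 - current.1
  let y_jump := target.2 - current.2
  if x_jump = 0 ∧ y_jump = 0 then []
  else
    let x_direction : Int := if x_jump ≥ 0 then 1 else -1
    let y_direction : Int := if y_jump ≥ 0 then 1 else -1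
    let x_steps := (PySem.List.pyRange (x_direction * pen_step) (x_jump + x_direction) (x_direction * pen_step)).map (fun _ => x_direction * pen_step)
    let x_steps := if PySem.Int.mod x_jump pen_step ≠ 0 then
        x_steps ++ [if x_direction = 1 then PySem.Int.mod x_jump pen_step else PySem.Int.mod x_jump pen_step - pen_step]
      else x_steps
    let y_steps := (PySem.List.pyRange (y_direction * pen_step) (y_jump + y_direction) (y_direction * pen_step)).map (fun _ => y_direction * pen_step)
    let y_steps := if PySem.Int.mod y_jump pen_step ≠ 0 then
        y_steps ++ [if y_direction = 1 then PySem.Int.mod y_jump pen_step else PySem.Int.mod y_jump pen_step - pen_step]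
      else y_steps
    if x_steps.length ≥ y_steps.length then
      ((PySem.List.slice x_steps none (some (y_steps.length : Int))).zip y_steps)
        ++ (PySem.List.slice x_steps (some (y_steps.length : Int)) none).map (fun x => (x, (0 : Int)))
    else
      (x_steps.zip (PySem.List.slice y_steps none (some (y_steps.length : Int))))
        ++ (PySem.List.slice y_steps (some (x_steps.length : Int)) none).map (fun y => ((0 : Int), y))

-- ===== PORT B =====
def msAltSplit (jump : Int) : Int × Int × Int × Int :=
  let step : Int := if jump ≥ 0 then 5 else -5
  let full : Int := PySem.Int.floordiv |jump| 5
  let rem : Int := jump - step * full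
  let total : Int := full + (if rem ≠ 0 then 1 else 0)
  (step, full, rem, total)

def move_sequence_alt (current : Int × Int) (target : Int × Int) : List (Int × Int) :=
  let x_jump := target.1 - current.1
  let y_jump := target.2 - current.2
  if x_jump = 0 ∧ y_jump = 0 then []
  else
    let sx := (msAltSplit x_jump).1
    let fx := (msAltSplit x_jump).2.1
    let rx := (msAltSplit x_jump).2.2.1
    let nx := (msAltSplit x_jump).2.2.2
    let sy := (msAltSplit y_jump).1
    let fy := (msAltSplit y_jump).2.1
    let ry := (msAltSplit y_jump).2.2.1
    let ny := (msAltSplit y_jump).2.2.2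
    (PySem.List.pyRange 0 (max nx ny) 1).foldl (fun moves i =>
      let dx := if i < fx then sx else if i < nx then rx else 0
      let dy := if i < fy then sy else if i < ny then ry else 0
      moves ++ [(dx, dy)]) []

-- ===== PRECONDITION & SPEC =====
def Spec_move_sequence (current : Int × Int) (target : Int × Int) (out : List (Int × Int)) : Prop := out = move_sequence_alt current target
instance (current : Int × Int) (target : Int × Int) (out : List (Int × Int)) : Decidable (Spec_move_sequence current target out) := by unfold Spec_move_sequence; infer_instance

-- ===== CLAIM (what is proved, stated in full; the proofs are below) =====
def Claim_equal_move_sequence : Prop := ∀ (current : Int × Int) (target : Int × Int), Dom_move_sequence current target → Spec_move_sequence current target (move_sequence current target)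

-- ===== LEMMAS AND PROOFS =====

def mergeA (X Y : List Int) : List (Int × Int) :=
  if X.length ≥ Y.length then
    ((X.take Y.length).zip Y) ++ (X.drop Y.length).map (fun x => (x, (0 : Int)))
  else
    (X.zip (Y.take Y.length)) ++ (Y.drop X.length).map (fun y => ((0 : Int), y))

theorem mergeA_eq_map_range (X Y : List Int) :
    mergeA X Y = (List.range (max X.length Y.length)).map (fun k => (X.getD k 0, Y.getD k 0)) := by
  induction X generalizing Y with
  | nil =>
    cases Y with
    | nil => simp [mergeA]
    | cons y ys =>
      apply List.ext_getElem
      · simp [mergeA]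
      · intro i h1 h2
        simp [mergeA, List.getD_eq_getElem?_getD] at h1 ⊢
        cases i with
        | zero => simp
        | succ i => simp [List.getElem?_eq_getElem (show i < ys.length by omega)]
  | cons x xs ih =>
    cases Y with
    | nil =>
      apply List.ext_getElem
      · simp [mergeA]
      · intro i h1 h2
        simp [mergeA, List.getD_eq_getElem?_getD] at h1 ⊢
        cases i with
        | zero => simp
        | succ i => simp [List.getElem?_eq_getElem (show i < xs.length by omega)]
    | cons y ys =>
      have hstep : mergeA (x :: xs) (y :: ys) = (x, y) :: mergeA xs ys := by
        simp only [mergeA, List.length_cons, ge_iff_le, Nat.add_le_add_iff_right]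
        split_ifs with h
        · simp [List.take_succ_cons, List.zip_cons_cons, List.drop_succ_cons]
        · simp [List.take_succ_cons, List.zip_cons_cons, List.drop_succ_cons]
      rw [hstep, ih]
      have hm : max (x::xs).length (y::ys).length = max xs.length ys.length + 1 := by
        simp [Nat.succ_max_succ]
      rw [hm, List.range_succ_eq_map]
      simp [List.map_map, Function.comp]


def stepList (j : Int) : List Int :=
  List.replicate (j.natAbs / 5) (if 0 ≤ j then 5 else -5)
    ++ (if (5 : Int) ∣ j then [] else [j - (if 0 ≤ j then 5 else -5) * ((j.natAbs / 5 : Nat) : Int)])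

theorem stepsA_eq (j : Int) :
    (if PySem.Int.mod j 5 ≠ 0 then
        (PySem.List.pyRange ((if j ≥ 0 then (1:Int) else -1) * 5) (j + (if j ≥ 0 then (1:Int) else -1)) ((if j ≥ 0 then (1:Int) else -1) * 5)).map (fun _ => (if j ≥ 0 then (1:Int) else -1) * 5)
          ++ [if (if j ≥ 0 then (1:Int) else -1) = 1 then PySem.Int.mod j 5 else PySem.Int.mod j 5 - 5]
      else (PySem.List.pyRange ((if j ≥ 0 then (1:Int) else -1) * 5) (j + (if j ≥ 0 then (1:Int) else -1)) ((if j ≥ 0 then (1:Int) else -1) * 5)).map (fun _ => (if j ≥ 0 then (1:Int) else -1) * 5))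
    = stepList j := by
  have hmod : PySem.Int.mod j 5 = j % 5 := PySem.Int.mod_eq_emod_of_pos (by norm_num)
  by_cases hj : 0 ≤ j
  · have hd : (if j ≥ 0 then (1:Int) else -1) = 1 := if_pos hj
    rw [hd]
    have hbase : (PySem.List.pyRange ((1:Int) * 5) (j + 1) ((1:Int) * 5)).map (fun _ => (1:Int) * 5)
        = List.replicate (j.natAbs / 5) (5 : Int) := by
      rw [PySem.List.pyRange_of_pos _ _ (by norm_num : (0:Int) < 1 * 5), List.map_map]
      simp only [Function.comp_def]
      rw [List.map_const', List.length_range]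
      have : (if (1:Int) * 5 < j + 1 then ((j + 1 - 1 * 5 + 1 * 5 - 1) / (1 * 5)).toNat else 0) = j.natAbs / 5 := by
        split_ifs <;> omega
      rw [this]
      norm_num
    rw [hbase]
    unfold stepList
    rw [if_pos hj]
    by_cases hdvd : (5:Int) ∣ j
    · rw [if_neg (by simp [hdvd]), if_pos hdvd, List.append_nil]
    · rw [if_pos (by simp [hdvd]), if_neg hdvd, if_pos rfl]
      have : PySem.Int.mod j 5 = j - 5 * ((j.natAbs / 5 : Nat) : Int) := by
        rw [hmod]; omega
      rw [this]
  · have hd : (if j ≥ 0 then (1:Int) else -1) = -1 := if_neg hj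
    rw [hd]
    have hbase : (PySem.List.pyRange ((-1:Int) * 5) (j + -1) ((-1:Int) * 5)).map (fun _ => (-1:Int) * 5)
        = List.replicate (j.natAbs / 5) (-5 : Int) := by
      rw [show ((-1:Int) * 5) = -5 by norm_num]
      simp only [PySem.List.pyRange]
      rw [if_neg (by norm_num : ¬ (-5:Int) = 0)]
      simp only [show ¬ (0:Int) < -5 by norm_num, if_false]
      rw [List.map_map]
      simp only [Function.comp_def]
      rw [List.map_const', List.length_range]
      rw [show (-5 - (j + -1) + - -5 - 1 : Int) = -j by ring, show (- -5 : Int) = 5 by norm_num]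
      have : (if j + -1 < -5 then ((-j) / 5).toNat else 0) = j.natAbs / 5 := by
        split_ifs <;> omega
      rw [this]
    rw [hbase]
    unfold stepList
    rw [if_neg hj]
    by_cases hdvd : (5:Int) ∣ j
    · rw [if_neg (by simp [hdvd]), if_pos hdvd, List.append_nil]
    · rw [if_pos (by simp [hdvd]), if_neg hdvd, if_neg (by norm_num : ¬ (-1:Int) = 1)]
      have : PySem.Int.mod j 5 - 5 = j - -5 * ((j.natAbs / 5 : Nat) : Int) := by
        rw [hmod]; omega
      rw [this]


theorem msAltSplit_eq (j : Int) : msAltSplit j =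
    (if j ≥ 0 then 5 else -5, ((j.natAbs / 5 : Nat) : Int),
     j - (if 0 ≤ j then (5:Int) else -5) * ((j.natAbs / 5 : Nat) : Int),
     ((j.natAbs / 5 : Nat) : Int) + (if (5:Int) ∣ j then 0 else 1)) := by
  simp only [msAltSplit, Int.abs_eq_natAbs]
  rw [PySem.Int.floordiv_eq_ediv_of_pos (by norm_num)]
  have h1 : ((j.natAbs : Int)) / 5 = ((j.natAbs / 5 : Nat) : Int) := by omega
  rw [h1]
  simp only [ge_iff_le]
  have h2 : (j - (if 0 ≤ j then (5:Int) else -5) * ((j.natAbs / 5 : Nat) : Int) ≠ 0) ↔ ¬ (5:Int) ∣ j := by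
    constructor
    · intro h hd; apply h; split_ifs <;> omega
    · intro h; split_ifs at * <;> omega
  simp only [h2, ite_not]

theorem stepList_length (j : Int) :
    ((stepList j).length : Int) = (msAltSplit j).2.2.2 := by
  rw [msAltSplit_eq]
  dsimp only
  simp only [stepList, List.length_append, List.length_replicate]
  by_cases hdvd : (5:Int) ∣ j <;> simp [hdvd]

theorem stepList_getD (j : Int) (k : Nat) :
    (if (k : Int) < (msAltSplit j).2.1 then (msAltSplit j).1
     else if (k : Int) < (msAltSplit j).2.2.2 then (msAltSplit j).2.2.1 else 0)
      = (stepList j).getD k 0 := by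
  rw [msAltSplit_eq]
  dsimp only
  by_cases hk : (k : Int) < ((j.natAbs / 5 : Nat) : Int)
  · rw [if_pos hk]
    rw [stepList, List.getD_append _ _ _ _ (by simp; omega)]
    rw [List.getD_eq_getElem _ _ (by simp; omega), List.getElem_replicate]
  · rw [if_neg hk]
    by_cases hdvd : (5:Int) ∣ j
    · rw [if_pos hdvd]
      rw [if_neg (by omega)]
      rw [stepList, if_pos hdvd, List.append_nil]
      rw [List.getD_eq_default _ _ (by simp; omega)]
    · rw [if_neg hdvd]
      by_cases hk2 : (k : Int) < ((j.natAbs / 5 : Nat) : Int) + 1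
      · rw [if_pos hk2]
        have hkeq : k = j.natAbs / 5 := by omega
        rw [stepList, if_neg hdvd, List.getD_eq_getElem _ _ (by simp [hkeq])]
        rw [List.getElem_append_right (by simp [hkeq])]
        simp [hkeq]
      · rw [if_neg hk2]
        rw [stepList, if_neg hdvd, List.getD_eq_default _ _ (by simp; omega)]

theorem move_sequence_eq_mergeA (c t : Int × Int) (h0 : ¬ (t.1 - c.1 = 0 ∧ t.2 - c.2 = 0)) :
    move_sequence c t = mergeA (stepList (t.1 - c.1)) (stepList (t.2 - c.2)) := by
  simp only [move_sequence]
  rw [if_neg h0]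
  rw [stepsA_eq (t.1 - c.1), stepsA_eq (t.2 - c.2)]
  rw [PySem.List.slice_to_natCast, PySem.List.slice_from_natCast,
      PySem.List.slice_to_natCast, PySem.List.slice_from_natCast]
  rfl

theorem move_sequence_alt_eq (c t : Int × Int) (h0 : ¬ (t.1 - c.1 = 0 ∧ t.2 - c.2 = 0)) :
    move_sequence_alt c t
      = (List.range (max (stepList (t.1 - c.1)).length (stepList (t.2 - c.2)).length)).map
          (fun k => ((stepList (t.1 - c.1)).getD k 0, (stepList (t.2 - c.2)).getD k 0)) := by
  simp only [move_sequence_alt]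
  rw [if_neg h0]
  rw [PySem.List.foldl_append_singleton_eq_map, List.nil_append, PySem.List.pyRange_one,
      List.map_map]
  have hN : ((max (msAltSplit (t.1 - c.1)).2.2.2 (msAltSplit (t.2 - c.2)).2.2.2) - 0).toNat
      = max (stepList (t.1 - c.1)).length (stepList (t.2 - c.2)).length := by
    rw [← stepList_length, ← stepList_length]
    omega
  rw [hN]
  refine (List.map_congr_left fun k _ => ?_).symm
  simp only [Function.comp_def, Int.zero_add]
  rw [← stepList_getD (t.1 - c.1) k, ← stepList_getD (t.2 - c.2) k]

theorem move_sequence_spec : Claim_equal_move_sequence := by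
  intro c t _h
  unfold Spec_move_sequence
  by_cases h0 : t.1 - c.1 = 0 ∧ t.2 - c.2 = 0
  · simp only [move_sequence, move_sequence_alt]
    rw [if_pos h0, if_pos h0]
  · rw [move_sequence_eq_mergeA c t h0, move_sequence_alt_eq c t h0, mergeA_eq_map_range]
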